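-- pv_equiv track=rewrite | github.com/gotutiyan/slp-assignments | ngramLM/lm.py | get_mgram_diff_context
-- ===== SOURCE A (Python) =====
-- def get_mgram_diff_context(sentences, n):
--     mgram_diff_context_set = {} # {mgram: set()}
--     for sentence in sentences:
--         for i in range(len(sentence)-n+1):
--             ngram = tuple(sentence[i:i+n])
--             mgram = ngram[:-1]
--             mgram_diff_context_set[mgram] = \
--                 mgram_diff_context_set.get(mgram, set())
--             mgram_diff_context_set[mgram].add(ngram[-1])
--     mgram_diff_context_freq = {}
--     for mgram, value in mgram_diff_context_set.items():
--         mgram_diff_context_freq[mgram] = len(value)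
--     return mgram_diff_context_freq
-- ===== SOURCE B (Python) =====
-- def get_mgram_diff_context(sentences, n):
--     # pass 1: one flat insertion-ordered set of all n-grams (dict keys keep first-seen order)
--     seen = {}
--     for sentence in sentences:
--         for i in range(len(sentence) - n + 1):
--             seen[tuple(sentence[i:i+n])] = None
--     # pass 2: each surviving distinct n-gram contributes 1 to its (n-1)-gram prefix
--     freq = {}
--     for ngram in seen:
--         mgram = ngram[:-1]
--         freq[mgram] = freq.get(mgram, 0) + 1
--     return freq
-- ===== Notes on version B (the rewrite author's own statement) =====
-- stated objective: alternative
-- what changed: Instead of maintaining a dict mapping each (n-1)-gram prefix to a growing set of next-words, B first deduplicates at the n-gram level in one flat insertion-ordered set of full n-grams, then a second pass counts each surviving distinct n-gram once under its prefix; deduplication and counting are separated.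
import Mathlib
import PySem

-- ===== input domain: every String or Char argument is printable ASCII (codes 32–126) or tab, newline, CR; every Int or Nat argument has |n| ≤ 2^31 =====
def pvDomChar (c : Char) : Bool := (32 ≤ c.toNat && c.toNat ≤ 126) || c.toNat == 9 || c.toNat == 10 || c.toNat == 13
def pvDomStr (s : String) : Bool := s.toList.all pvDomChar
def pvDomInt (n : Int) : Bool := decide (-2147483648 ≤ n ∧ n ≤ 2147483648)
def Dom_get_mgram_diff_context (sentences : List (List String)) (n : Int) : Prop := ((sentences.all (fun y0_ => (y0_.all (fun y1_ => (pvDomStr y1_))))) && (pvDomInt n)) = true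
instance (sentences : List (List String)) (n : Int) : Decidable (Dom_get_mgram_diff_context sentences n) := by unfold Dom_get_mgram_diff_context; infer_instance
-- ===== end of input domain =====

-- B separates n-gram-level deduplication (one flat ordered set of n-grams) from counting (one pass over the
-- distinct n-grams, incrementing their prefix); A instead keeps a dict of per-prefix next-word sets.

-- ===== PORT A =====
def get_mgram_diff_context (sentences : List (List String)) (n : Int) : List (List String × Int) :=
  let setDict : PySem.Dict (List String) (PySem.Set String) :=
    sentences.foldl (fun d sentence =>
      (PySem.List.pyRange 0 ((sentence.length : Int) - n + 1) 1).foldl (fun d i =>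
        let ngram := PySem.List.slice sentence (some i) (some (i + n))
        let mgram := PySem.List.slice ngram none (some (-1))
        match PySem.List.pyGet? ngram (-1) with   -- ngram[-1]; none = IndexError, excluded by Pre_
        | some last =>
            PySem.Dict.insert d mgram (PySem.Set.add (PySem.Dict.getD d mgram PySem.Set.empty) last)
        | none => d) d) PySem.Dict.empty
  (PySem.Dict.items setDict).foldl
    (fun f kv => PySem.Dict.insert f kv.1 (PySem.Set.len kv.2)) PySem.Dict.empty |>.items

-- ===== PORT B =====
def get_mgram_diff_context_alt (sentences : List (List String)) (n : Int) : List (List String × Int) :=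
  let seen : PySem.Dict (List String) (Option Unit) :=
    sentences.foldl (fun s sentence =>
      (PySem.List.pyRange 0 ((sentence.length : Int) - n + 1) 1).foldl (fun s i =>
        PySem.Dict.insert s (PySem.List.slice sentence (some i) (some (i + n))) none) s)
      PySem.Dict.empty
  let freq : PySem.Dict (List String) Int :=
    (PySem.Dict.keys seen).foldl (fun f ngram =>
      let mgram := PySem.List.slice ngram none (some (-1))
      PySem.Dict.insert f mgram (PySem.Dict.getD f mgram 0 + 1)) PySem.Dict.empty
  freq.items

-- ===== PRECONDITION & SPEC =====
-- With n ≤ 0 and any sentence present, every n-gram slice is empty and A raises IndexError on ngram[-1];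
-- Pre_ excludes exactly those inputs.
def Pre_get_mgram_diff_context (sentences : List (List String)) (n : Int) : Prop :=
  1 ≤ n ∨ sentences = []
instance (sentences : List (List String)) (n : Int) : Decidable (Pre_get_mgram_diff_context sentences n) := by unfold Pre_get_mgram_diff_context; infer_instance
def pvWitness_get_mgram_diff_context : List (List String) × Int := ([["a", "b"], ["a", "c"]], 2)

def Spec_get_mgram_diff_context (sentences : List (List String)) (n : Int) (out : List (List String × Int)) : Prop := out = get_mgram_diff_context_alt sentences n
instance (sentences : List (List String)) (n : Int) (out : List (List String × Int)) : Decidable (Spec_get_mgram_diff_context sentences n out) := by unfold Spec_get_mgram_diff_context; infer_instance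

-- ===== CLAIM (what is proved, stated in full; the proofs are below) =====
def Claim_equal_get_mgram_diff_context : Prop := ∀ (sentences : List (List String)) (n : Int), Dom_get_mgram_diff_context sentences n → Pre_get_mgram_diff_context sentences n → Spec_get_mgram_diff_context sentences n (get_mgram_diff_context sentences n)

-- ===== LEMMAS AND PROOFS =====

-- the flat stream of n-grams both programs traverse
def pvNgrams (sentences : List (List String)) (n : Int) : List (List String) :=
  sentences.flatMap (fun s =>
    (PySem.List.pyRange 0 ((s.length : Int) - n + 1) 1).map
      (fun i => PySem.List.slice s (some i) (some (i + n))))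

def pvLast (g : List String) : String := g.getLast?.getD ""

def pvStepA (d : PySem.Dict (List String) (PySem.Set String)) (g : List String) :
    PySem.Dict (List String) (PySem.Set String) :=
  match PySem.List.pyGet? g (-1) with
  | some last =>
      PySem.Dict.insert d g.dropLast
        (PySem.Set.add (PySem.Dict.getD d g.dropLast PySem.Set.empty) last)
  | none => d

def pvS (G : List (List String)) (p : List String) : PySem.Set String :=
  PySem.Set.ofList ((G.filter (fun g => g.dropLast == p)).map pvLast)

-- g ≠ [] → g = g.dropLast ++ [pvLast g]
theorem pvLast_spec {g : List String} (h : g ≠ []) : g.dropLast ++ [pvLast g] = g := by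
  have h1 : g.getLast? = some (g.getLast h) := List.getLast?_eq_some_getLast h
  simp only [pvLast, h1, Option.getD_some]
  exact List.dropLast_append_getLast h

theorem pvLast_eq_getLast {g : List String} (h : g ≠ []) : pvLast g = g.getLast h := by
  simp only [pvLast, List.getLast?_eq_some_getLast h, Option.getD_some]

theorem pvStepA_eq (d : PySem.Dict (List String) (PySem.Set String)) {g : List String}
    (h : g ≠ []) :
    pvStepA d g = PySem.Dict.insert d g.dropLast
      (PySem.Set.add (PySem.Dict.getD d g.dropLast PySem.Set.empty) (pvLast g)) := by
  simp only [pvStepA, PySem.List.pyGet?_neg_one, List.getLast?_eq_some_getLast h,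
    pvLast_eq_getLast h]

theorem pvS_snoc_eq (G : List (List String)) (g p : List String) (h : g.dropLast = p) :
    pvS (G ++ [g]) p = PySem.Set.add (pvS G p) (pvLast g) := by
  simp only [pvS, List.filter_append, List.filter_cons, List.filter_nil, h, beq_self_eq_true,
    if_pos, List.map_append, List.map_cons, List.map_nil]
  exact PySem.Set.ofList_append_singleton _ _

theorem pvS_snoc_ne (G : List (List String)) (g p : List String) (h : ¬ g.dropLast = p) :
    pvS (G ++ [g]) p = pvS G p := by
  have hb : (g.dropLast == p) = false := beq_false_of_ne h
  simp [pvS, List.filter_append, hb]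

-- every n-gram in the stream is nonempty when 1 ≤ n
theorem pvNgrams_ne_nil (sentences : List (List String)) (n : Int) (hn : 1 ≤ n) :
    ∀ g ∈ pvNgrams sentences n, g ≠ [] := by
  intro g hg
  simp only [pvNgrams, List.mem_flatMap, List.mem_map] at hg
  obtain ⟨s, _, i, hi, rfl⟩ := hg
  rw [PySem.List.mem_pyRange_one] at hi
  have h0 : (0:Int) ≤ i := hi.1
  have h1 : i + n ≤ (s.length : Int) := by omega
  have h2 : (0:Int) ≤ i + n := by omega
  rw [PySem.List.slice_toNat s h0 h2]
  apply List.ne_nil_of_length_pos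
  have hlen : i.toNat + n.toNat ≤ s.length := by omega
  simp only [List.length_take, List.length_drop]
  omega

-- A's port, flattened over the stream of n-grams
theorem pvA_flat (sentences : List (List String)) (n : Int) :
    get_mgram_diff_context sentences n =
      (((pvNgrams sentences n).foldl pvStepA PySem.Dict.empty).items.foldl
        (fun f kv => PySem.Dict.insert f kv.1 (PySem.Set.len kv.2)) PySem.Dict.empty).items := by
  simp only [get_mgram_diff_context, pvNgrams, pvStepA, List.foldl_flatMap, List.foldl_map,
    PySem.List.slice_to_neg_one]

-- the dict of per-prefix next-word sets, characterised
theorem pvFoldA_items (G : List (List String)) (hne : ∀ g ∈ G, g ≠ []) :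
    (G.foldl pvStepA PySem.Dict.empty).items
      = (PySem.Set.ofList (G.map List.dropLast)).map (fun p => (p, pvS G p)) := by
  induction G using List.reverseRecOn with
  | nil => rfl
  | append_singleton G g IH =>
    have hg : g ≠ [] := hne g (by simp)
    have hG : ∀ g' ∈ G, g' ≠ [] := fun g' h => hne g' (by simp [h])
    have IH' := IH hG
    set d := G.foldl pvStepA PySem.Dict.empty with hd
    have hkeys : d.keys = PySem.Set.ofList (G.map List.dropLast) := by
      show d.items.map (·.1) = _
      rw [IH', List.map_map]
      simp [Function.comp_def]
    have hnodup : d.keys.Nodup := by rw [hkeys]; exact PySem.Set.nodup_ofList _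
    rw [List.foldl_append, List.foldl_cons, List.foldl_nil, pvStepA_eq d hg]
    have hset : PySem.Set.ofList ((G ++ [g]).map List.dropLast)
        = PySem.Set.add (PySem.Set.ofList (G.map List.dropLast)) g.dropLast := by
      rw [List.map_append]; exact PySem.Set.ofList_append_singleton _ _
    by_cases hp : g.dropLast ∈ PySem.Set.ofList (G.map List.dropLast)
    · -- prefix already present: overwrite in place
      have hcont : d.contains g.dropLast = true := by
        rw [PySem.Dict.contains_iff_mem_keys, hkeys]; exact hp
      have hmem : (g.dropLast, pvS G g.dropLast) ∈ d.items := by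
        rw [IH']; exact List.mem_map.2 ⟨g.dropLast, hp, rfl⟩
      have hgetD : PySem.Dict.getD d g.dropLast PySem.Set.empty = pvS G g.dropLast :=
        PySem.Dict.getD_of_mem_items d hmem hnodup _
      rw [PySem.Dict.items_insert_of_contains d _ hcont, IH', List.map_map, hset,
        PySem.Set.add_of_mem hp, hgetD]
      apply List.map_congr_left
      intro p hpmem
      by_cases hpe : p = g.dropLast
      · subst hpe
        simp only [Function.comp_apply, beq_self_eq_true, if_true]
        rw [pvS_snoc_eq G g g.dropLast rfl]
      · have hb : (p == g.dropLast) = false := beq_false_of_ne hpe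
        simp only [Function.comp_apply, hb, Bool.false_eq_true, if_false]
        rw [pvS_snoc_ne G g p (fun h => hpe h.symm)]
    · -- new prefix: append
      have hcont : d.contains g.dropLast = false := by
        rcases h : d.contains g.dropLast with _ | _
        · rfl
        · exact absurd ((PySem.Dict.contains_iff_mem_keys d _).1 h) (by rw [hkeys]; exact hp)
      have hgetD : PySem.Dict.getD d g.dropLast PySem.Set.empty = PySem.Set.empty :=
        PySem.Dict.getD_of_not_contains d _ hcont
      have hfilnil : G.filter (fun g' => g'.dropLast == g.dropLast) = [] := by
        rw [List.filter_eq_nil_iff]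
        intro a ha hb
        exact hp ((PySem.Set.mem_ofList _ _).2 (List.mem_map.2 ⟨a, ha, eq_of_beq hb⟩))
      have hSg : pvS (G ++ [g]) g.dropLast
          = PySem.Set.add (PySem.Dict.getD d g.dropLast PySem.Set.empty) (pvLast g) := by
        rw [pvS_snoc_eq G g g.dropLast rfl, hgetD]
        simp [pvS, hfilnil]
      rw [PySem.Dict.items_insert_of_not_contains d _ hcont, IH', hset,
        PySem.Set.add_of_not_mem hp, List.map_append, List.map_cons, List.map_nil]
      congr 1
      · apply List.map_congr_left
        intro p hpmem
        have hpe : ¬ g.dropLast = p := fun h => hp (h ▸ hpmem)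
        rw [pvS_snoc_ne G g p hpe]
      · rw [hSg]

-- the length-taking second loop of A
theorem pvItemsLen (L : List (List String × PySem.Set String)) (d : PySem.Dict (List String) Int)
    (hnd : (L.map (·.1)).Nodup) (hdis : ∀ k ∈ L.map (·.1), d.contains k = false) :
    (L.foldl (fun f kv => PySem.Dict.insert f kv.1 (PySem.Set.len kv.2)) d).items
      = d.items ++ L.map (fun kv => (kv.1, PySem.Set.len kv.2)) := by
  induction L generalizing d with
  | nil => simp
  | cons kv L IH =>
    simp only [List.map_cons, List.nodup_cons] at hnd
    have hc : d.contains kv.1 = false := hdis kv.1 (by simp)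
    rw [List.foldl_cons,
      IH _ hnd.2 (fun k hk => by
        rw [PySem.Dict.contains_insert]
        have hne : (k == kv.1) = false := beq_false_of_ne (fun h => hnd.1 (h ▸ hk))
        rw [hne, Bool.false_or]
        exact hdis k (by simp [hk])),
      PySem.Dict.items_insert_of_not_contains d _ hc]
    simp

-- B's first pass collects exactly the ordered set of distinct n-grams
theorem pvSeen_keys (G : List (List String)) :
    (G.foldl (fun s g => PySem.Dict.insert s g (none : Option Unit)) PySem.Dict.empty).keys
      = PySem.Set.ofList G := by
  induction G using List.reverseRecOn with
  | nil => rfl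
  | append_singleton G g IH =>
    rw [List.foldl_append, List.foldl_cons, List.foldl_nil,
      PySem.Set.ofList_append_singleton, PySem.Set.add_eq_ite, ← IH]
    set d := G.foldl (fun s g => PySem.Dict.insert s g (none : Option Unit)) PySem.Dict.empty
    by_cases hm : g ∈ d.keys
    · rw [PySem.Dict.keys_insert_of_contains d _ ((PySem.Dict.contains_iff_mem_keys d g).2 hm),
        if_pos hm]
    · have hc : d.contains g = false := by
        rcases h : d.contains g with _ | _
        · rfl
        · exact absurd ((PySem.Dict.contains_iff_mem_keys d g).1 h) hm
      rw [PySem.Dict.keys_insert_of_not_contains d _ hc, if_neg hm]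

-- B's port, flattened: the seen-dict fold over the n-gram stream
theorem pvSeen_flat (sentences : List (List String)) (n : Int) :
    (sentences.foldl (fun s sentence =>
        (PySem.List.pyRange 0 ((sentence.length : Int) - n + 1) 1).foldl (fun s i =>
          PySem.Dict.insert s (PySem.List.slice sentence (some i) (some (i + n)))
            (none : Option Unit)) s) PySem.Dict.empty)
      = (pvNgrams sentences n).foldl (fun s g => PySem.Dict.insert s g (none : Option Unit))
          PySem.Dict.empty := by
  simp only [pvNgrams, List.foldl_flatMap, List.foldl_map]

-- B's port is the counter of the prefixes of the distinct n-grams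
theorem pvB_flat (sentences : List (List String)) (n : Int) :
    get_mgram_diff_context_alt sentences n =
      (PySem.Dict.counter ((PySem.Set.ofList (pvNgrams sentences n)).map List.dropLast)).items := by
  simp only [get_mgram_diff_context_alt]
  rw [pvSeen_flat, pvSeen_keys]
  simp only [PySem.List.slice_to_neg_one]
  rw [← List.foldl_map (f := List.dropLast)
      (g := fun f mg => PySem.Dict.insert f mg (PySem.Dict.getD f mg 0 + 1)),
    PySem.Dict.foldl_insert_getD_add_one_eq_counter]

-- deduplicating before mapping does not change the deduplicated image
theorem pvOfList_map_ofList {α β : Type} [BEq α] [LawfulBEq α] [BEq β] [LawfulBEq β]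
    (xs : List α) (f : α → β) :
    PySem.Set.ofList ((PySem.Set.ofList xs).map f) = PySem.Set.ofList (xs.map f) := by
  induction xs using List.reverseRecOn with
  | nil => rfl
  | append_singleton xs x IH =>
    rw [List.map_append, List.map_cons, List.map_nil,
      PySem.Set.ofList_append_singleton (xs.map f) (f x), PySem.Set.ofList_append_singleton xs x]
    by_cases hm : x ∈ PySem.Set.ofList xs
    · rw [PySem.Set.add_of_mem hm, IH,
        PySem.Set.add_of_mem (by
          rw [PySem.Set.mem_ofList]
          exact List.mem_map_of_mem ((PySem.Set.mem_ofList xs x).1 hm))]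
    · rw [PySem.Set.add_of_not_mem hm, List.map_append, List.map_cons, List.map_nil,
        PySem.Set.ofList_append_singleton, IH]

-- dedup commutes with filter
theorem pvOfList_filter {α : Type} [BEq α] [LawfulBEq α] (xs : List α) (q : α → Bool) :
    PySem.Set.ofList (xs.filter q) = (PySem.Set.ofList xs).filter q := by
  induction xs using List.reverseRecOn with
  | nil => rfl
  | append_singleton xs x IH =>
    rw [List.filter_append, PySem.Set.ofList_append_singleton xs x]
    by_cases hm : x ∈ PySem.Set.ofList xs
    · rw [PySem.Set.add_of_mem hm, ← IH]
      rcases hq : q x with _ | _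
      · simp [hq]
      · simp only [List.filter_cons, hq, if_true, List.filter_nil]
        rw [PySem.Set.ofList_append_singleton,
          PySem.Set.add_of_mem (by
            rw [PySem.Set.mem_ofList]
            exact List.mem_filter.2 ⟨(PySem.Set.mem_ofList xs x).1 hm, hq⟩)]
    · rw [PySem.Set.add_of_not_mem hm, List.filter_append, ← IH]
      rcases hq : q x with _ | _
      · simp [hq]
      · simp only [List.filter_cons, hq, if_true, List.filter_nil]
        rw [PySem.Set.ofList_append_singleton,
          PySem.Set.add_of_not_mem (by
            rw [PySem.Set.mem_ofList]
            exact fun h => hm ((PySem.Set.mem_ofList xs x).2 (List.mem_filter.1 h).1))]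

-- dedup commutes with an injective-on-the-list map
theorem pvOfList_map_inj {α β : Type} [BEq α] [LawfulBEq α] [BEq β] [LawfulBEq β]
    (xs : List α) (f : α → β) (hinj : ∀ a ∈ xs, ∀ b ∈ xs, f a = f b → a = b) :
    PySem.Set.ofList (xs.map f) = (PySem.Set.ofList xs).map f := by
  induction xs using List.reverseRecOn with
  | nil => rfl
  | append_singleton xs x IH =>
    have hinj' : ∀ a ∈ xs, ∀ b ∈ xs, f a = f b → a = b :=
      fun a ha b hb => hinj a (by simp [ha]) b (by simp [hb])
    rw [List.map_append, List.map_cons, List.map_nil,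
      PySem.Set.ofList_append_singleton (xs.map f) (f x), PySem.Set.ofList_append_singleton xs x,
      IH hinj']
    by_cases hm : x ∈ PySem.Set.ofList xs
    · rw [PySem.Set.add_of_mem hm,
        PySem.Set.add_of_mem (by
          exact List.mem_map_of_mem hm)]
    · have hfm : f x ∉ (PySem.Set.ofList xs).map f := by
        intro h
        obtain ⟨a, ha, hfa⟩ := List.mem_map.1 h
        have haxs := (PySem.Set.mem_ofList xs a).1 ha
        have : a = x := hinj a (by simp [haxs]) x (by simp) hfa
        exact hm (this ▸ ha)
      rw [PySem.Set.add_of_not_mem hm, PySem.Set.add_of_not_mem hfm, List.map_append,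
        List.map_cons, List.map_nil]

-- the count of a prefix among distinct n-grams = the number of distinct next-words of that prefix
theorem pvCount_eq_len (G : List (List String)) (hne : ∀ g ∈ G, g ≠ []) (p : List String) :
    ((((PySem.Set.ofList G).map List.dropLast).count p : Nat) : Int)
      = PySem.Set.len (pvS G p) := by
  have hcount : ((PySem.Set.ofList G).map List.dropLast).count p
      = ((PySem.Set.ofList G).filter (fun g => g.dropLast == p)).length := by
    rw [List.count_eq_countP, List.countP_map, List.countP_eq_length_filter]
    rfl
  have hfil : (PySem.Set.ofList G).filter (fun g => g.dropLast == p)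
      = PySem.Set.ofList (G.filter (fun g => g.dropLast == p)) :=
    (pvOfList_filter G _).symm
  have hinj : ∀ a ∈ G.filter (fun g => g.dropLast == p),
      ∀ b ∈ G.filter (fun g => g.dropLast == p), pvLast a = pvLast b → a = b := by
    intro a ha b hb hab
    obtain ⟨haG, hap⟩ := List.mem_filter.1 ha
    obtain ⟨hbG, hbp⟩ := List.mem_filter.1 hb
    have h1 := pvLast_spec (hne a haG)
    have h2 := pvLast_spec (hne b hbG)
    rw [← h1, ← h2, eq_of_beq hap, eq_of_beq hbp, hab]
  have hmap : pvS G p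
      = (PySem.Set.ofList (G.filter (fun g => g.dropLast == p))).map pvLast :=
    pvOfList_map_inj _ pvLast hinj
  have hlen : PySem.Set.len (pvS G p)
      = ((PySem.Set.ofList (G.filter (fun g => g.dropLast == p))).length : Int) := by
    rw [hmap]
    simp [PySem.Set.len]
  rw [hlen, hcount, hfil]

-- the core equivalence over an arbitrary stream of nonempty n-grams
theorem pvMain (G : List (List String)) (hne : ∀ g ∈ G, g ≠ []) :
    ((G.foldl pvStepA PySem.Dict.empty).items.foldl
        (fun f kv => PySem.Dict.insert f kv.1 (PySem.Set.len kv.2)) PySem.Dict.empty).items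
      = (PySem.Dict.counter ((PySem.Set.ofList G).map List.dropLast)).items := by
  rw [pvFoldA_items G hne,
    pvItemsLen _ PySem.Dict.empty
      (by
        rw [List.map_map]
        have h1 : (PySem.Set.ofList (G.map List.dropLast)).map
            ((fun x : List String × PySem.Set String => x.1) ∘ fun p => (p, pvS G p))
            = PySem.Set.ofList (G.map List.dropLast) := by
          simp [Function.comp_def]
        rw [h1]
        exact PySem.Set.nodup_ofList _)
      (fun k _ => PySem.Dict.contains_empty k),
    PySem.Dict.items_counter, pvOfList_map_ofList, List.map_map]
  have hemp : (PySem.Dict.empty : PySem.Dict (List String) Int).items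
      = ([] : List (List String × Int)) := rfl
  rw [hemp, List.nil_append]
  apply List.map_congr_left
  intro p hp
  simp only [Function.comp_apply]
  rw [← pvCount_eq_len G hne p]

-- ===== VERDICT (by name: the statement is the Claim_ definition above) =====
theorem get_mgram_diff_context_spec : Claim_equal_get_mgram_diff_context := by
  intro sentences n _ hpre
  unfold Spec_get_mgram_diff_context
  rcases hpre with hn | hnil
  · rw [pvA_flat, pvB_flat, pvMain _ (pvNgrams_ne_nil sentences n hn)]
  · subst hnil; rfl
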